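-- pv_equiv track=rewrite | github.com/hundredthtree-OvO/myEmbodiedVLA-agent | src/study_agent/second_pass.py | _concept_hint_score
-- ===== SOURCE A (Python) =====
-- CONCEPT_HINTS: dict[str, tuple[str, ...]] = {
--     "action": ("action", "sample", "predict", "_out_", "_head", "_proj"),
--     "head": ("_head", "_out_", "_proj", "predictor", "decoder"),
--     "reason": ("reason", "fusion", "cross", "extractor"),
--     "token": ("token", "mask", "prompt", "cache", "position"),
--     "bridge": ("bridge", "cross", "adapter", "extractor"),
--     "attention": ("attention", "attn", "mask", "query", "key", "value"),
-- }
--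
-- def _concept_hint_score(lowered_line: str, lowered_focus: list[str]) -> tuple[int, str]:
--     best_score = 0
--     best_reason = ""
--     for focus in lowered_focus:
--         if not focus:
--             continue
--         matched = False
--         for key, hints in CONCEPT_HINTS.items():
--             if key in focus:
--                 for hint in hints:
--                     if hint in lowered_line:
--                         matched = True
--                         if 66 > best_score:
--                             best_score = 66
--                             best_reason = f"concept_hint:{focus}:{hint}"
--         if not matched and focus in lowered_line and 60 > best_score:
--             best_score = 60
--             best_reason = f"concept_hint:{focus}"
--     return best_score, best_reason
-- ===== SOURCE B (Python) =====
-- CONCEPT_HINTS: dict[str, tuple[str, ...]] = {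
--     "action": ("action", "sample", "predict", "_out_", "_head", "_proj"),
--     "head": ("_head", "_out_", "_proj", "predictor", "decoder"),
--     "reason": ("reason", "fusion", "cross", "extractor"),
--     "token": ("token", "mask", "prompt", "cache", "position"),
--     "bridge": ("bridge", "cross", "adapter", "extractor"),
--     "attention": ("attention", "attn", "mask", "query", "key", "value"),
-- }
--
-- def _concept_hint_score(lowered_line: str, lowered_focus: list[str]) -> tuple[int, str]:
--     # First pass: the hard cap 66 is locked by the very first hint match, so
--     # return at the first (focus, key, hint) triple that fires.
--     for focus in lowered_focus:
--         if not focus: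
--             continue
--         for key, hints in CONCEPT_HINTS.items():
--             if key in focus:
--                 for hint in hints:
--                     if hint in lowered_line:
--                         return 66, f"concept_hint:{focus}:{hint}"
--     # Second pass: no hint fired anywhere, so every focus had matched == False;
--     # the first non-empty focus appearing in the line wins with 60.
--     for focus in lowered_focus:
--         if focus and focus in lowered_line:
--             return 60, f"concept_hint:{focus}"
--     return 0, ""
-- ===== Notes on version B (the rewrite author's own statement) =====
-- stated objective: simpler
-- what changed: Replaces the matched-flag/best_score accumulator loop by two early-return passes: the first returns 66 at the first (focus,key,hint) hit, the second returns 60 at the first non-empty focus contained in the line.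
import Mathlib
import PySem

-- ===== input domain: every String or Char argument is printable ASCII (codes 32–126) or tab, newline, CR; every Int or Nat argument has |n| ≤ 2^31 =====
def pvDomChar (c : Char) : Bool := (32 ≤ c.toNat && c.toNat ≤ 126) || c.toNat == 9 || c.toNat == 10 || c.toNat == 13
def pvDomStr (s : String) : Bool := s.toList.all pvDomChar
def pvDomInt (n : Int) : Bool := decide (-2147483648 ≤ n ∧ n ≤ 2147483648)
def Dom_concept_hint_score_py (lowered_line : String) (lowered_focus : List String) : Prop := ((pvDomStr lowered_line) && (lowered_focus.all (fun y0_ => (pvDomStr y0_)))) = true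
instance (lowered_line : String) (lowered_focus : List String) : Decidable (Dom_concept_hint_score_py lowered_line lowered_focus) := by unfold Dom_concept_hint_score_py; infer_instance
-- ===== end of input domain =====

-- B replaces A's matched-flag/best_score accumulator by two early-return passes (simpler decomposition; same cost).

-- ===== PORT A =====
-- the module constant CONCEPT_HINTS, as an insertion-ordered association list
def conceptHints : List (String × List String) :=
  [("action", ["action", "sample", "predict", "_out_", "_head", "_proj"]),
   ("head", ["_head", "_out_", "_proj", "predictor", "decoder"]),
   ("reason", ["reason", "fusion", "cross", "extractor"]),
   ("token", ["token", "mask", "prompt", "cache", "position"]),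
   ("bridge", ["bridge", "cross", "adapter", "extractor"]),
   ("attention", ["attention", "attn", "mask", "query", "key", "value"])]

-- inner `for hint in hints` loop; state (matched, best_score, best_reason)
def aHintLoop (lowered_line focus : String) : List String → Bool × Int × String → Bool × Int × String
  | [], st => st
  | hint :: rest, (m, s, r) =>
    if PySem.Str.isIn hint lowered_line then
      aHintLoop lowered_line focus rest
        (true, if 66 > s then (66, "concept_hint:" ++ focus ++ ":" ++ hint) else (s, r))
    else aHintLoop lowered_line focus rest (m, s, r)

-- `for key, hints in CONCEPT_HINTS.items()` loop
def aItemLoop (lowered_line focus : String) : List (String × List String) → Bool × Int × String → Bool × Int × String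
  | [], st => st
  | (key, hints) :: rest, st =>
    if PySem.Str.isIn key focus then
      aItemLoop lowered_line focus rest (aHintLoop lowered_line focus hints st)
    else aItemLoop lowered_line focus rest st

-- outer `for focus in lowered_focus` loop; state (best_score, best_reason)
def aFocusLoop (lowered_line : String) : List String → Int × String → Int × String
  | [], st => st
  | focus :: rest, (s, r) =>
    if focus = "" then aFocusLoop lowered_line rest (s, r)
    else
      match aItemLoop lowered_line focus conceptHints (false, s, r) with
      | (m, s', r') =>
        if ¬ m ∧ PySem.Str.isIn focus lowered_line ∧ 60 > s' then
          aFocusLoop lowered_line rest (60, "concept_hint:" ++ focus)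
        else aFocusLoop lowered_line rest (s', r')

def concept_hint_score_py (lowered_line : String) (lowered_focus : List String) : Int × String :=
  aFocusLoop lowered_line lowered_focus (0, "")

-- ===== PORT B =====
-- first hint of hints occurring in the line
def bFirstHint (lowered_line : String) : List String → Option String
  | [] => none
  | hint :: rest => if PySem.Str.isIn hint lowered_line then some hint else bFirstHint lowered_line rest

-- first hint among items whose key occurs in focus
def bFindHit (lowered_line focus : String) : List (String × List String) → Option String
  | [] => none
  | (key, hints) :: rest =>
    if PySem.Str.isIn key focus then
      match bFirstHint lowered_line hints with
      | some hint => some hint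
      | none => bFindHit lowered_line focus rest
    else bFindHit lowered_line focus rest

-- first pass: first (focus, hint) pair that fires
def bFind66 (lowered_line : String) : List String → Option (String × String)
  | [] => none
  | focus :: rest =>
    if focus = "" then bFind66 lowered_line rest
    else
      match bFindHit lowered_line focus conceptHints with
      | some hint => some (focus, hint)
      | none => bFind66 lowered_line rest

-- second pass: first non-empty focus contained in the line
def bFallback (lowered_line : String) : List String → Option String
  | [] => none
  | focus :: rest =>
    if focus ≠ "" ∧ PySem.Str.isIn focus lowered_line then some focus
    else bFallback lowered_line rest

def concept_hint_score_py_alt (lowered_line : String) (lowered_focus : List String) : Int × String :=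
  match bFind66 lowered_line lowered_focus with
  | some (focus, hint) => (66, "concept_hint:" ++ focus ++ ":" ++ hint)
  | none =>
    match bFallback lowered_line lowered_focus with
    | some focus => (60, "concept_hint:" ++ focus)
    | none => (0, "")

-- ===== PRECONDITION & SPEC =====
def Spec_concept_hint_score_py (lowered_line : String) (lowered_focus : List String) (out : Int × String) : Prop := out = concept_hint_score_py_alt lowered_line lowered_focus
instance (lowered_line : String) (lowered_focus : List String) (out : Int × String) : Decidable (Spec_concept_hint_score_py lowered_line lowered_focus out) := by unfold Spec_concept_hint_score_py; infer_instance

-- ===== CLAIM (what is proved, stated in full; the proofs are below) =====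
def Claim_equal_concept_hint_score_py : Prop := ∀ (lowered_line : String) (lowered_focus : List String), Dom_concept_hint_score_py lowered_line lowered_focus → Spec_concept_hint_score_py lowered_line lowered_focus (concept_hint_score_py lowered_line lowered_focus)

-- ===== LEMMAS AND PROOFS =====

-- hint loop at score 66: matched absorbs when already true, score/reason unchanged
theorem aHintLoop_66_true (line focus : String) (hints : List String) (r : String) :
    aHintLoop line focus hints (true, 66, r) = (true, 66, r) := by
  induction hints with
  | nil => rfl
  | cons h t ih => simp only [aHintLoop]; split <;> simpa using ih

theorem aHintLoop_66_snd (line focus : String) (hints : List String) (m : Bool) (r : String) :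
    (aHintLoop line focus hints (m, 66, r)).2 = (66, r) := by
  induction hints generalizing m with
  | nil => rfl
  | cons h t ih => simp only [aHintLoop]; split <;> simp [ih]

-- hint loop from a low score: first hint in the line locks (true, 66, reason)
theorem aHintLoop_low (line focus : String) (hints : List String) (m : Bool) (s : Int) (r : String)
    (hs : s < 66) :
    aHintLoop line focus hints (m, s, r) =
      match bFirstHint line hints with
      | some hint => (true, 66, "concept_hint:" ++ focus ++ ":" ++ hint)
      | none => (m, s, r) := by
  induction hints with
  | nil => rfl
  | cons h t ih =>
    simp only [aHintLoop, bFirstHint]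
    split
    · simp [aHintLoop_66_true]
    · exact ih

-- item loop at score 66
theorem aItemLoop_66_true (line focus : String) (items : List (String × List String)) (r : String) :
    aItemLoop line focus items (true, 66, r) = (true, 66, r) := by
  induction items with
  | nil => rfl
  | cons p t ih =>
    obtain ⟨k, hs⟩ := p
    simp only [aItemLoop]
    split
    · rw [aHintLoop_66_true]; exact ih
    · exact ih

theorem aItemLoop_66_snd (line focus : String) (items : List (String × List String)) (m : Bool) (r : String) :
    (aItemLoop line focus items (m, 66, r)).2 = (66, r) := by
  induction items generalizing m with
  | nil => rfl
  | cons p t ih =>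
    obtain ⟨k, hs⟩ := p
    simp only [aItemLoop]
    split
    · have h2 := aHintLoop_66_snd line focus hs m r
      rcases heq : aHintLoop line focus hs (m, 66, r) with ⟨m', st⟩
      rw [heq] at h2; simp at h2; rw [h2]; exact ih m'
    · exact ih m

-- item loop from a low score with matched = false
theorem aItemLoop_low (line focus : String) (items : List (String × List String)) (s : Int) (r : String)
    (hs : s < 66) :
    aItemLoop line focus items (false, s, r) =
      match bFindHit line focus items with
      | some hint => (true, 66, "concept_hint:" ++ focus ++ ":" ++ hint)
      | none => (false, s, r) := by
  induction items with
  | nil => rfl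
  | cons p t ih =>
    obtain ⟨k, hints⟩ := p
    simp only [aItemLoop, bFindHit]
    split
    · rw [aHintLoop_low line focus hints false s r hs]
      cases h : bFirstHint line hints with
      | some hint => simp [aItemLoop_66_true]
      | none => simp [ih]
    · exact ih

-- focus loop at score 66 is inert
theorem aFocusLoop_66 (line : String) (foci : List String) (r : String) :
    aFocusLoop line foci (66, r) = (66, r) := by
  induction foci with
  | nil => rfl
  | cons f t ih =>
    simp only [aFocusLoop]
    split
    · exact ih
    · have h2 := aItemLoop_66_snd line f conceptHints false r
      rcases heq : aItemLoop line f conceptHints (false, 66, r) with ⟨m', s', r'⟩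
      rw [heq] at h2
      simp only [Prod.mk.injEq] at h2
      obtain ⟨hs', hr'⟩ := h2
      subst hs' hr'
      rw [if_neg (by rintro ⟨-, -, h⟩; norm_num at h)]
      exact ih

-- focus loop at score 60: only a first-pass hit can change the state
theorem aFocusLoop_60 (line : String) (foci : List String) (r : String) :
    aFocusLoop line foci (60, r) =
      match bFind66 line foci with
      | some (focus, hint) => (66, "concept_hint:" ++ focus ++ ":" ++ hint)
      | none => (60, r) := by
  induction foci with
  | nil => rfl
  | cons f t ih =>
    simp only [aFocusLoop, bFind66]
    split
    · exact ih
    · rw [aItemLoop_low line f conceptHints 60 r (by norm_num)]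
      cases h : bFindHit line f conceptHints with
      | some hint => simp [aFocusLoop_66]
      | none => simpa using ih

-- focus loop at score 0 computes B's two-pass result
theorem aFocusLoop_0 (line : String) (foci : List String) (r : String) :
    aFocusLoop line foci (0, r) =
      match bFind66 line foci with
      | some (focus, hint) => (66, "concept_hint:" ++ focus ++ ":" ++ hint)
      | none =>
        match bFallback line foci with
        | some focus => (60, "concept_hint:" ++ focus)
        | none => (0, r) := by
  induction foci with
  | nil => rfl
  | cons f t ih =>
    simp only [aFocusLoop, bFind66, bFallback]
    by_cases hf : f = ""
    · simp [hf, ih]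
    · simp only [if_neg hf]
      rw [aItemLoop_low line f conceptHints 0 r (by norm_num)]
      cases h : bFindHit line f conceptHints with
      | some hint => simp [aFocusLoop_66]
      | none =>
        simp only
        by_cases hin : PySem.Chars.isIn f.toList line.toList = true
        · simp [hin, hf, aFocusLoop_60]
        · simp [hin, hf, ih]

-- ===== VERDICT (by name: the statement is the Claim_ definition above) =====
theorem concept_hint_score_py_spec : Claim_equal_concept_hint_score_py := by
  intro line foci _
  show concept_hint_score_py line foci = concept_hint_score_py_alt line foci
  unfold concept_hint_score_py concept_hint_score_py_alt
  rw [aFocusLoop_0]
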